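-- pv_equiv track=rewrite | github.com/MalkovGN/leetcode | main.py | problem2391
-- ===== SOURCE A (Python) =====
-- def problem2391(garbage, travel):
--     truck_idx = {
--         'P': 0,
--         'G': 0,
--         'M': 0,
--     }
--     p_minutes = garbage[0].count('P')
--     g_minutes = garbage[0].count('G')
--     m_minutes = garbage[0].count('M')
--     for idx in range(1, len(garbage)):
--         if 'P' in garbage[idx]:
--             p_minutes += sum(travel[truck_idx['P']:idx])
--             p_minutes += garbage[idx].count('P')
--             truck_idx['P'] = idx
--         if 'M' in garbage[idx]:
--             m_minutes += sum(travel[truck_idx['M']:idx])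
--             m_minutes += garbage[idx].count('M')
--             truck_idx['M'] = idx
--         if 'G' in garbage[idx]:
--             g_minutes += sum(travel[truck_idx['G']:idx])
--             g_minutes += garbage[idx].count('G')
--             truck_idx['G'] = idx
--
--     return p_minutes + m_minutes + g_minutes
-- ===== SOURCE B (Python) =====
-- def problem2391(garbage, travel):
--     total = 0
--     for c in 'PGM':
--         last = 0
--         for i, s in enumerate(garbage):
--             total += s.count(c)
--             if c in s:
--                 last = i
--         total += sum(travel[:last])
--     return total
-- ===== Notes on version B (the rewrite author's own statement) =====
-- stated objective: simpler
-- what changed: Replaces A's single pass with a per-truck running position dictionary and repeated travel slices by a per-type scan that only records the last house containing the type, adding one prefix travel sum per type (slice sums telescope away).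
import Mathlib
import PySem

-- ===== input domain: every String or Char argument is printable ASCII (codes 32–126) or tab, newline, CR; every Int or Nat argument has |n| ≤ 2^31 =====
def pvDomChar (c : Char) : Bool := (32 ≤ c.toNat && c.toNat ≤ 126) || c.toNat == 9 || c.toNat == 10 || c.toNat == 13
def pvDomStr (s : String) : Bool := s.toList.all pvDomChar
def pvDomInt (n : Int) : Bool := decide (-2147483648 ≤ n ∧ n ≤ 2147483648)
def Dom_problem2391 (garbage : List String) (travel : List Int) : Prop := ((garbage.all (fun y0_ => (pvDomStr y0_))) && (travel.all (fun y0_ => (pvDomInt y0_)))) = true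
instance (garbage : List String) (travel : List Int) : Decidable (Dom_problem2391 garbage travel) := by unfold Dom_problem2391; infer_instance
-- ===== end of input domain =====

-- B replaces A's single loop with per-truck running positions and repeated travel slices by one scan
-- per garbage type recording only the last house containing it, plus one travel prefix sum per type
-- (objective: simpler; return values proved equal on nonempty garbage).

-- ===== PORT A =====
-- the repeated per-truck update pattern of A's loop body (identical for 'P', 'M', 'G')
def pvStepA (garbage : List String) (travel : List Int) (c : String)
    (st : Int × Int) (idx : Int) : Int × Int :=
  let gi := (PySem.List.pyGet? garbage idx).getD ""
  if PySem.Str.isIn c gi then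
    (st.1 + (PySem.List.slice travel (some st.2) (some idx)).sum + (PySem.Str.count gi c : Int), idx)
  else st

def problem2391 (garbage : List String) (travel : List Int) : Int :=
  -- garbage[0] raises IndexError on empty garbage (excluded by Pre_); the port reads "" there
  let g0 := (PySem.List.pyGet? garbage 0).getD ""
  let r := (PySem.List.pyRange 1 (garbage.length : Int) 1).foldl
      (fun st idx => (pvStepA garbage travel "P" st.1 idx,
                      pvStepA garbage travel "G" st.2.1 idx,
                      pvStepA garbage travel "M" st.2.2 idx))
      (((PySem.Str.count g0 "P" : Int), 0),
       ((PySem.Str.count g0 "G" : Int), 0),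
       ((PySem.Str.count g0 "M" : Int), 0))
  r.1.1 + r.2.2.1 + r.2.1.1

-- ===== PORT B =====
-- one pass for one garbage type: add its counts, remember the last house containing it,
-- then add the travel prefix sum up to that house
def pvTruckTotal (garbage : List String) (travel : List Int) (total : Int) (c : String) : Int :=
  let st := (PySem.List.enumerate garbage 0).foldl
      (fun (st : Int × Int) p =>
        (st.1 + (PySem.Str.count p.2 c : Int), if PySem.Str.isIn c p.2 then p.1 else st.2))
      (total, 0)
  st.1 + (PySem.List.slice travel none (some st.2)).sum

def problem2391_alt (garbage : List String) (travel : List Int) : Int :=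
  (["P", "G", "M"] : List String).foldl (pvTruckTotal garbage travel) 0

-- ===== PRECONDITION & SPEC =====
-- Pre_ excludes only the empty garbage list, on which A raises IndexError at garbage[0].
def Pre_problem2391 (garbage : List String) (travel : List Int) : Prop := garbage ≠ []
instance (garbage : List String) (travel : List Int) : Decidable (Pre_problem2391 garbage travel) := by unfold Pre_problem2391; infer_instance
def pvWitness_problem2391 : List String × List Int := (["PG", "MP"], [3])

def Spec_problem2391 (garbage : List String) (travel : List Int) (out : Int) : Prop := out = problem2391_alt garbage travel
instance (garbage : List String) (travel : List Int) (out : Int) : Decidable (Spec_problem2391 garbage travel out) := by unfold Spec_problem2391; infer_instance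

-- ===== CLAIM (what is proved, stated in full; the proofs are below) =====
def Claim_equal_problem2391 : Prop := ∀ (garbage : List String) (travel : List Int), Dom_problem2391 garbage travel → Pre_problem2391 garbage travel → Spec_problem2391 garbage travel (problem2391 garbage travel)

-- ===== LEMMAS AND PROOFS =====

-- count.go never matches a pattern when the needle is not an infix, so it returns its accumulator
lemma pv_count_go_eq_acc (sub : List Char) (fuel : Nat) : ∀ (l : List Char) (acc : Nat),
    ¬ sub <:+: l → PySem.Chars.count.go sub fuel l acc = acc := by
  induction fuel with
  | zero => intro l acc h; rw [PySem.Chars.count.go]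
  | succ fuel ih =>
    intro l acc h
    cases l with
    | nil =>
      rw [PySem.Chars.count.go]
      omega
    | cons x t =>
      rw [PySem.Chars.count.go]
      have hp : sub.isPrefixOf (x :: t) = false := by
        rw [Bool.eq_false_iff]
        intro hpre
        exact h ((List.isPrefixOf_iff_prefix.mp hpre).isInfix)
      rw [hp]
      simp only [Bool.false_eq_true, if_false]
      exact ih t acc (fun hi => h (hi.trans (List.suffix_cons x t).isInfix))

-- a nonempty substring that does not occur in s has count 0 ('P' ∉ s → s.count('P') = 0)
lemma pv_count_zero_of_not_isIn (s c : List Char) (hc : c ≠ [])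
    (h : PySem.Chars.isIn c s = false) : PySem.Chars.count s c = 0 := by
  unfold PySem.Chars.count
  rw [if_neg (by simp [hc])]
  exact pv_count_go_eq_acc c s.length s 0 ((PySem.Chars.isIn_eq_false_iff c s).mp h)

-- the last index whose string contains c (0 if none), exactly as B's inner fold computes it
def pvLast (c : String) (garbage : List String) : Int :=
  (PySem.List.enumerate garbage 0).foldl
    (fun l p => if PySem.Str.isIn c p.2 then p.1 else l) 0

lemma pvLast_bounds (c : String) : ∀ (xs : List String) (s z : Int), 0 ≤ z → z ≤ s →
    0 ≤ (PySem.List.enumerate xs s).foldl (fun l p => if PySem.Str.isIn c p.2 then p.1 else l) z ∧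
    (PySem.List.enumerate xs s).foldl (fun l p => if PySem.Str.isIn c p.2 then p.1 else l) z ≤ s + xs.length := by
  intro xs
  induction xs with
  | nil => intro s z h0 hz; simp [PySem.List.enumerate_nil]; omega
  | cons x t ih =>
    intro s z h0 hz
    rw [PySem.List.enumerate_cons, List.foldl_cons]
    by_cases hx : PySem.Str.isIn c x
    · simp only [hx, if_pos]
      have := ih (s+1) s (by omega) (by omega)
      constructor
      · omega
      · simp only [List.length_cons]; push_cast; omega
    · simp only [hx, Bool.false_eq_true, if_false]
      have := ih (s+1) z (by omega) (by omega)
      constructor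
      · omega
      · simp only [List.length_cons]; push_cast; omega

lemma pvLast_nonneg_le (c : String) (xs : List String) :
    0 ≤ pvLast c xs ∧ pvLast c xs ≤ xs.length := by
  have := pvLast_bounds c xs 0 0 le_rfl le_rfl
  unfold pvLast
  omega

lemma pvLast_append (c : String) (l : List String) (s : String) :
    pvLast c (l ++ [s]) = if PySem.Str.isIn c s then (l.length : Int) else pvLast c l := by
  unfold pvLast
  rw [PySem.List.enumerate_append, List.foldl_append]
  simp [PySem.List.enumerate_cons, PySem.List.enumerate_nil]

-- the per-type count as an Int
def pvCnt (c : String) (s : String) : Int := (PySem.Str.count s c : Int)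

-- travel slices telescope: prefix to a plus the slice a..n is the prefix to n
lemma pv_slice_split (travel : List Int) (a n : Int) (h0 : 0 ≤ a) (han : a ≤ n) :
    (PySem.List.slice travel none (some a)).sum
      + (PySem.List.slice travel (some a) (some n)).sum
      = (PySem.List.slice travel none (some n)).sum := by
  have hn : (0:Int) ≤ n := le_trans h0 han
  rw [PySem.List.slice_to _ h0, PySem.List.slice_toNat _ h0 hn, PySem.List.slice_to _ hn]
  have hle : a.toNat ≤ n.toNat := Int.toNat_le_toNat han
  rw [show n.toNat = a.toNat + (n.toNat - a.toNat) by omega, List.take_add, List.sum_append,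
    show a.toNat + (n.toNat - a.toNat) - a.toNat = n.toNat - a.toNat by omega]

-- appending a house does not change A's step at indices inside the old list
lemma pv_stepA_append (l : List String) (s : String) (travel : List Int) (c : String)
    (st : Int × Int) (idx : Int) (h1 : 1 ≤ idx) (h2 : idx < (l.length : Int)) :
    pvStepA (l ++ [s]) travel c st idx = pvStepA l travel c st idx := by
  unfold pvStepA
  have h0 : (0:Int) ≤ idx := by omega
  have : PySem.List.pyGet? (l ++ [s]) idx = PySem.List.pyGet? l idx := by
    rw [show idx = ((idx.toNat : Nat) : Int) by omega]
    rw [PySem.List.pyGet?_natCast, PySem.List.pyGet?_natCast]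
    exact List.getElem?_append_left (by omega)
  rw [this]

-- A's per-type loop in closed form: start + counts after house 0 + travel prefix to the last house containing c
lemma pv_mainA (c : String) (hc : c.toList ≠ []) (travel : List Int) :
    ∀ (garbage : List String) (a0 : Int),
    (PySem.List.pyRange 1 (garbage.length : Int) 1).foldl (pvStepA garbage travel c) (a0, 0)
      = (a0 + ((garbage.drop 1).map (pvCnt c)).sum
            + (PySem.List.slice travel none (some (pvLast c garbage))).sum,
         pvLast c garbage) := by
  intro garbage
  induction garbage using List.reverseRecOn with
  | nil =>
    intro a0
    rw [PySem.List.pyRange_one_eq_nil (by simp)]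
    have h0 : pvLast c ([] : List String) = 0 := by
      unfold pvLast; rw [PySem.List.enumerate_nil]; rfl
    rw [h0, PySem.List.slice_to _ le_rfl]
    simp
  | append_singleton l s ih =>
    intro a0
    rcases eq_or_ne l [] with rfl | hl
    · rw [show ((([] : List String) ++ [s]).length : Int) = 1 by simp,
        PySem.List.pyRange_one_eq_nil le_rfl]
      have hlast : pvLast c ([] ++ [s]) = 0 := by
        unfold pvLast
        rw [List.nil_append, PySem.List.enumerate_cons, PySem.List.enumerate_nil]
        simp only [List.foldl_cons, List.foldl_nil]
        split <;> rfl
      rw [hlast, PySem.List.slice_to _ le_rfl]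
      simp
    · have hn : 1 ≤ (l.length : Int) := by
        have := List.length_pos_of_ne_nil hl
        omega
      have hcast : (((l ++ [s]).length : Nat) : Int) = (l.length : Int) + 1 := by
        simp
      rw [hcast, PySem.List.pyRange_one_succ_right hn, List.foldl_append]
      rw [PySem.List.foldl_congr_mem (PySem.List.pyRange 1 (l.length : Int))
        (pvStepA (l ++ [s]) travel c) (pvStepA l travel c) (a0, 0)
        (fun acc x hx => pv_stepA_append l s travel c acc x
          ((PySem.List.mem_pyRange_one).mp hx).1 ((PySem.List.mem_pyRange_one).mp hx).2)]
      rw [ih a0]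
      have hbounds := pvLast_nonneg_le c l
      have hget : (PySem.List.pyGet? (l ++ [s]) (l.length : Int)).getD "" = s := by
        rw [PySem.List.pyGet?_natCast, List.getElem?_concat_length]; rfl
      rw [List.foldl_cons, List.foldl_nil]
      unfold pvStepA
      simp only [hget]
      rw [pvLast_append, List.drop_append_of_le_length (by omega)]
      by_cases hs : PySem.Str.isIn c s
      · simp only [hs, if_pos, List.map_append, List.sum_append, List.map_cons, List.map_nil,
          List.sum_cons, List.sum_nil]
        have hsplit := pv_slice_split travel (pvLast c l) (l.length : Int) hbounds.1 (by omega)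
        simp only [Prod.mk.injEq]
        refine ⟨?_, trivial⟩
        rw [← hsplit]
        unfold pvCnt
        ring
      · simp only [hs, Bool.false_eq_true, if_false, List.map_append, List.sum_append,
          List.map_cons, List.map_nil, List.sum_cons, List.sum_nil]
        have hz : pvCnt c s = 0 := by
          unfold pvCnt
          have hsf : PySem.Chars.isIn c.toList s.toList = false := by
            simpa using (Bool.eq_false_iff.mpr hs)
          have h2 := pv_count_zero_of_not_isIn s.toList c.toList hc hsf
          simp [PySem.Str.count_eq, h2]
        rw [hz]
        simp only [Prod.mk.injEq]
        exact ⟨by ring, trivial⟩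

-- B's per-type pass in closed form
lemma pv_mainB (c : String) (garbage : List String) (travel : List Int) (total : Int) :
    pvTruckTotal garbage travel total c
      = total + (garbage.map (pvCnt c)).sum
          + (PySem.List.slice travel none (some (pvLast c garbage))).sum := by
  unfold pvTruckTotal
  rw [PySem.List.foldl_prod_mk
      (fun (a : Int) (p : Int × String) => a + (PySem.Str.count p.2 c : Int))
      (fun (l : Int) (p : Int × String) => if PySem.Str.isIn c p.2 then p.1 else l)]
  show (PySem.List.enumerate garbage 0).foldl (fun acc x => acc + (PySem.Str.count x.2 c : Int)) total
      + (PySem.List.slice travel none (some (pvLast c garbage))).sum = _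
  rw [PySem.List.foldl_add]
  have : (PySem.List.enumerate garbage 0).map (fun p => ((PySem.Str.count p.2 c : Int)))
      = garbage.map (pvCnt c) := by
    have h2 := PySem.List.map_snd_enumerate garbage 0
    calc (PySem.List.enumerate garbage 0).map (fun p => ((PySem.Str.count p.2 c : Int)))
        = ((PySem.List.enumerate garbage 0).map (fun p => p.2)).map (pvCnt c) := by
          rw [List.map_map]; rfl
      _ = garbage.map (pvCnt c) := by rw [h2]
  rw [this]

lemma pv_final (garbage : List String) (travel : List Int) (h : garbage ≠ []) :
    problem2391 garbage travel = problem2391_alt garbage travel := by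
  obtain ⟨g, rest, rfl⟩ := List.exists_cons_of_ne_nil h
  have hg0 : (PySem.List.pyGet? (g :: rest) 0).getD "" = g := by
    simp [PySem.List.pyGet?, PySem.List.pyIdx?]
  simp only [problem2391]
  rw [hg0]
  rw [PySem.List.foldl_prod_mk
      (pvStepA (g :: rest) travel "P")
      (fun (st2 : (Int × Int) × (Int × Int)) idx =>
        (pvStepA (g :: rest) travel "G" st2.1 idx, pvStepA (g :: rest) travel "M" st2.2 idx))]
  rw [PySem.List.foldl_prod_mk
      (pvStepA (g :: rest) travel "G")
      (pvStepA (g :: rest) travel "M")]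
  rw [pv_mainA "P" (by decide) travel (g :: rest),
      pv_mainA "G" (by decide) travel (g :: rest),
      pv_mainA "M" (by decide) travel (g :: rest)]
  show ((PySem.Str.count g "P" : Int) + ((rest).map (pvCnt "P")).sum
          + (PySem.List.slice travel none (some (pvLast "P" (g :: rest)))).sum)
      + ((PySem.Str.count g "M" : Int) + ((rest).map (pvCnt "M")).sum
          + (PySem.List.slice travel none (some (pvLast "M" (g :: rest)))).sum)
      + ((PySem.Str.count g "G" : Int) + ((rest).map (pvCnt "G")).sum
          + (PySem.List.slice travel none (some (pvLast "G" (g :: rest)))).sum)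
      = problem2391_alt (g :: rest) travel
  unfold problem2391_alt
  rw [List.foldl_cons, List.foldl_cons, List.foldl_cons, List.foldl_nil]
  rw [pv_mainB, pv_mainB, pv_mainB]
  simp only [List.map_cons, List.sum_cons]
  unfold pvCnt
  ring

-- ===== VERDICT (by name: the statement is the Claim_ definition above) =====
theorem problem2391_spec : Claim_equal_problem2391 := by
  intro garbage travel _ hpre
  unfold Spec_problem2391
  exact pv_final garbage travel hpre
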